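-- pv_equiv track=rewrite | github.com/dmbwebb/surveycto-questionnaire | scripts/surveycto_to_txt.py | find_label_column_index
-- ===== SOURCE A (Python) =====
-- def find_label_column_index(headers):
--     """Find the best label column - prefers 'label' over language-specific ones."""
--     # First look for exact 'label'
--     for i, header in enumerate(headers):
--         if header and str(header).lower() == 'label':
--             return i
--
--     # Then look for any label column (label::English, label:Hindi, etc.)
--     for i, header in enumerate(headers):
--         if header and str(header).lower().startswith('label'):
--             # Skip 'label:data' columns
--             if 'data' not in str(header).lower():
--                 return i
--
--     return None
-- ===== SOURCE B (Python) =====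
-- def find_label_column_index(headers):
--     """Single pass: exact 'label' returns immediately; first non-data 'label*' prefix kept as fallback."""
--     fallback = None
--     for i, header in enumerate(headers):
--         if not header:
--             continue
--         low = str(header).lower()
--         if low == 'label':
--             return i
--         if fallback is None and low.startswith('label') and 'data' not in low:
--             fallback = i
--     return fallback
-- ===== Notes on version B (the rewrite author's own statement) =====
-- stated objective: alternative
-- what changed: Replaced A's two full scans over headers by a single enumerate pass that returns an exact 'label' match immediately and otherwise keeps the first non-data 'label' prefix match as a fallback.
import Mathlib
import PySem

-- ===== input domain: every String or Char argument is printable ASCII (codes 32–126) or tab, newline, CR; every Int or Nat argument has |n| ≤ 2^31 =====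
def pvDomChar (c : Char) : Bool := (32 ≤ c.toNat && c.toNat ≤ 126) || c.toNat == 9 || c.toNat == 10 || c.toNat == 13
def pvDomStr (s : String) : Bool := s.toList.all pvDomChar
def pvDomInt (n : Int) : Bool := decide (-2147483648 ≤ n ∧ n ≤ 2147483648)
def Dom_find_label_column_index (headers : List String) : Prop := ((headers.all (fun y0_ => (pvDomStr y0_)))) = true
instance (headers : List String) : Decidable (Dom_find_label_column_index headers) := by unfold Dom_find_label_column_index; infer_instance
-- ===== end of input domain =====

-- B fuses A's two scans into one enumerate pass keeping a fallback index; same return value everywhere.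


-- ===== PORT A =====
-- first loop of A: exact (case-insensitive) 'label'
def pvA_scan1 : List String → Nat → Option Int
  | [], _ => none
  | h :: t, i =>
    if h ≠ "" ∧ PySem.Str.lower h = "label" then some (i : Int)
    else pvA_scan1 t (i + 1)

-- second loop of A: prefix 'label', skipping headers containing 'data'
def pvA_scan2 : List String → Nat → Option Int
  | [], _ => none
  | h :: t, i =>
    if h ≠ "" ∧ PySem.Str.startswith (PySem.Str.lower h) "label" = true then
      if PySem.Str.isIn "data" (PySem.Str.lower h) = false then some (i : Int)
      else pvA_scan2 t (i + 1)
    else pvA_scan2 t (i + 1)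

def find_label_column_index (headers : List String) : Option Int :=
  match pvA_scan1 headers 0 with
  | some i => some i
  | none => pvA_scan2 headers 0

-- ===== PORT B =====
def pvB_loop : List String → Nat → Option Int → Option Int
  | [], _, fb => fb
  | h :: t, i, fb =>
    if h = "" then pvB_loop t (i + 1) fb
    else
      let low := PySem.Str.lower h
      if low = "label" then some (i : Int)
      else if fb = none ∧ PySem.Str.startswith low "label" = true ∧
                PySem.Str.isIn "data" low = false then
        pvB_loop t (i + 1) (some (i : Int))
      else pvB_loop t (i + 1) fb

def find_label_column_index_alt (headers : List String) : Option Int :=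
  pvB_loop headers 0 none

-- ===== PRECONDITION & SPEC =====
def Spec_find_label_column_index (headers : List String) (out : Option Int) : Prop := out = find_label_column_index_alt headers
instance (headers : List String) (out : Option Int) : Decidable (Spec_find_label_column_index headers out) := by unfold Spec_find_label_column_index; infer_instance

-- ===== CLAIM (what is proved, stated in full; the proofs are below) =====
def Claim_equal_find_label_column_index : Prop := ∀ (headers : List String), Dom_find_label_column_index headers → Spec_find_label_column_index headers (find_label_column_index headers)

-- ===== LEMMAS AND PROOFS =====
-- Loop invariant: B's single pass equals "A's first scan, else the recorded fallback, else A's second scan".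
theorem pvB_loop_eq (t : List String) : ∀ (i : Nat) (fb : Option Int),
    pvB_loop t i fb =
      match pvA_scan1 t i with
      | some j => some j
      | none => match fb with
        | some f => some f
        | none => pvA_scan2 t i := by
  induction t with
  | nil => intro i fb; cases fb <;> rfl
  | cons h t ih =>
    intro i fb
    by_cases he : h = ""
    · simp [pvB_loop, pvA_scan1, pvA_scan2, he, ih]
    · by_cases hl : PySem.Str.lower h = "label"
      · simp [pvB_loop, pvA_scan1, he, hl]
      · by_cases hs : PySem.Chars.startswith (PySem.Chars.lower h.toList) ['l','a','b','e','l'] = true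
        · by_cases hd : PySem.Chars.isIn ['d','a','t','a'] (PySem.Chars.lower h.toList) = false
          · cases fb with
            | none =>
              simp [pvB_loop, pvA_scan1, pvA_scan2, he, hl, hs, hd, ih]
            | some f =>
              simp [pvB_loop, pvA_scan1, he, hl, hs, hd, ih]
          · cases fb <;>
              simp [pvB_loop, pvA_scan1, pvA_scan2, he, hl, hs, hd, ih]
        · cases fb <;>
            simp [pvB_loop, pvA_scan1, pvA_scan2, he, hl, hs, ih]

-- ===== VERDICT (by name: the statement is the Claim_ definition above) =====
theorem find_label_column_index_spec : Claim_equal_find_label_column_index := by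
  intro headers _
  unfold Spec_find_label_column_index find_label_column_index find_label_column_index_alt
  rw [pvB_loop_eq]
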